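-- pv_equiv track=rewrite | github.com/chenedwin54288/NAL_sm | client_server/AnalysisPhase/extract_ip_cwnd.py | infer_target
-- ===== SOURCE A (Python) =====
-- def infer_target(samples, ip: str | None, port: int | None):
--     inferred_ip = ip
--     inferred_port = str(port) if port is not None else None
--
--     if samples and inferred_ip is None:
--         ips = {sample["ip"] for sample in samples if sample["ip"]}
--         if len(ips) == 1:
--             inferred_ip = ips.pop()
--
--     if samples and inferred_port is None:
--         ports = {sample["port"] for sample in samples if sample["port"]}
--         if len(ports) == 1:
--             inferred_port = ports.pop()
--
--     return inferred_ip, inferred_port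
-- ===== SOURCE B (Python) =====
-- def infer_target(samples, ip: str | None, port: int | None):
--     inferred_ip = ip
--     inferred_port = str(port) if port is not None else None
--
--     ip_cand = None
--     ip_amb = False
--     port_cand = None
--     port_amb = False
--     for sample in samples:
--         v = sample.get("ip")
--         if v:
--             if ip_cand is None:
--                 ip_cand = v
--             elif v != ip_cand:
--                 ip_amb = True
--         w = sample.get("port")
--         if w:
--             if port_cand is None:
--                 port_cand = w
--             elif w != port_cand:
--                 port_amb = True
--
--     if inferred_ip is None and ip_cand is not None and not ip_amb:
--         inferred_ip = ip_cand
--     if inferred_port is None and port_cand is not None and not port_amb: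
--         inferred_port = port_cand
--
--     return inferred_ip, inferred_port
-- ===== Notes on version B (the rewrite author's own statement) =====
-- stated objective: simpler
-- what changed: Replaces A's two set-comprehension passes (build a set per field, test len==1, pop) with a single loop over samples maintaining a candidate value and an ambiguous flag per field.
-- outside the precondition, e.g. on infer_target([{'port': '80'}], None, None): A raises KeyError, B returns (None, '80')
import Mathlib
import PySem

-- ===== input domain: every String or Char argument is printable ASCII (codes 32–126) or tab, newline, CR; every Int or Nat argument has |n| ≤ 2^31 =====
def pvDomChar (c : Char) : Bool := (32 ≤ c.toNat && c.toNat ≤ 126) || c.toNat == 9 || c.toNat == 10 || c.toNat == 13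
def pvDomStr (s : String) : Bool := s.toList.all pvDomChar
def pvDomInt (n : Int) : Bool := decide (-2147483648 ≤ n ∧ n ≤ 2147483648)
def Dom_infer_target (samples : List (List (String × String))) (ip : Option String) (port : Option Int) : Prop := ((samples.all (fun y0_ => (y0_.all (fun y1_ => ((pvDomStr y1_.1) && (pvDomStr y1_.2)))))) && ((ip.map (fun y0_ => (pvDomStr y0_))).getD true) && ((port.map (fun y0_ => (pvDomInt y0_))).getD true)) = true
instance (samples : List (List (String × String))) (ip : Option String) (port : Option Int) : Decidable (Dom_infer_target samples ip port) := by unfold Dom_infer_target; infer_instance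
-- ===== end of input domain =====

-- B replaces A's two per-field set comprehensions with a single pass keeping a candidate
-- value and an ambiguous flag per field (objective: simpler one-pass decomposition).

-- ===== PORT A =====
def infer_target (samples : List (List (String × String))) (ip : Option String) (port : Option Int) : Option String × Option String :=
  let inferred_ip : Option String := ip
  let inferred_port : Option String := port.map (fun p => PySem.Int.toStr p)
  let inferred_ip : Option String :=
    if samples ≠ [] ∧ inferred_ip = none then
      let ips : PySem.Set String :=
        PySem.Set.ofList (samples.filterMap (fun s =>
          let v := (List.lookup "ip" s).getD ""
          if v ≠ "" then some v else none))
      if ips.length = 1 then ips.head? else inferred_ip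
    else inferred_ip
  let inferred_port : Option String :=
    if samples ≠ [] ∧ inferred_port = none then
      let ports : PySem.Set String :=
        PySem.Set.ofList (samples.filterMap (fun s =>
          let v := (List.lookup "port" s).getD ""
          if v ≠ "" then some v else none))
      if ports.length = 1 then ports.head? else inferred_port
    else inferred_port
  (inferred_ip, inferred_port)

-- ===== PORT B =====
-- one truthy field update of Source B's loop body (candidate, ambiguous-flag)
def pvStep (st : Option String × Bool) (v : String) : Option String × Bool :=
  if v ≠ "" then
    match st.1 with
    | none => (some v, st.2)
    | some c => if v ≠ c then (st.1, true) else st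
  else st

-- sample.get(key) then the truthy update (absent key = falsy None)
def pvUpd (st : Option String × Bool) (s : List (String × String)) (key : String) : Option String × Bool :=
  match List.lookup key s with
  | some v => pvStep st v
  | none => st

def infer_target_alt (samples : List (List (String × String))) (ip : Option String) (port : Option Int) : Option String × Option String :=
  let inferred_ip : Option String := ip
  let inferred_port : Option String := port.map (fun p => PySem.Int.toStr p)
  let st := samples.foldl (fun st s => (pvUpd st.1 s "ip", pvUpd st.2 s "port"))
              ((none, false), (none, false))
  let inferred_ip := if inferred_ip = none ∧ st.1.1.isSome ∧ st.1.2 = false then st.1.1 else inferred_ip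
  let inferred_port := if inferred_port = none ∧ st.2.1.isSome ∧ st.2.2 = false then st.2.1 else inferred_port
  (inferred_ip, inferred_port)

-- ===== PRECONDITION & SPEC =====
-- Pre_ excludes exactly the inputs where Python A raises KeyError: a sample missing the
-- "ip" (resp. "port") key while that field must be inferred (argument None, samples nonempty).
def Pre_infer_target (samples : List (List (String × String))) (ip : Option String) (port : Option Int) : Prop :=
  (ip = none → ∀ s ∈ samples, (List.lookup "ip" s).isSome) ∧
  (port = none → ∀ s ∈ samples, (List.lookup "port" s).isSome)
instance (samples : List (List (String × String))) (ip : Option String) (port : Option Int) : Decidable (Pre_infer_target samples ip port) := by unfold Pre_infer_target; infer_instance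
def pvWitness_infer_target : (List (List (String × String))) × Option String × Option Int :=
  ([[("ip", "1.2.3.4"), ("port", "80")]], none, none)
def Spec_infer_target (samples : List (List (String × String))) (ip : Option String) (port : Option Int) (out : Option String × Option String) : Prop := out = infer_target_alt samples ip port
instance (samples : List (List (String × String))) (ip : Option String) (port : Option Int) (out : Option String × Option String) : Decidable (Spec_infer_target samples ip port out) := by unfold Spec_infer_target; infer_instance

-- ===== CLAIM (what is proved, stated in full; the proofs are below) =====
def Claim_equal_infer_target : Prop := ∀ (samples : List (List (String × String))) (ip : Option String) (port : Option Int), Dom_infer_target samples ip port → Pre_infer_target samples ip port → Spec_infer_target samples ip port (infer_target samples ip port)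

-- ===== LEMMAS AND PROOFS =====

-- the truthy values a key contributes, in sample order (missing key / "" are falsy, dropped)
def pvVs (key : String) (samples : List (List (String × String))) : List String :=
  samples.filterMap (fun s =>
    let v := (List.lookup key s).getD ""
    if v ≠ "" then some v else none)

def pvScanIp (samples : List (List (String × String))) : Option String × Bool :=
  samples.foldl (fun st s => pvUpd st s "ip") (none, false)

def pvScanPort (samples : List (List (String × String))) : Option String × Bool :=
  samples.foldl (fun st s => pvUpd st s "port") (none, false)

theorem pvFoldl_pair (l : List (List (String × String))) (a b : Option String × Bool) :
    l.foldl (fun st s => (pvUpd st.1 s "ip", pvUpd st.2 s "port")) (a, b)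
      = (l.foldl (fun st s => pvUpd st s "ip") a, l.foldl (fun st s => pvUpd st s "port") b) := by
  induction l generalizing a b with
  | nil => rfl
  | cons x xs ih => simpa using ih (pvUpd a x "ip") (pvUpd b x "port")

theorem pvScan_eq (key : String) (samples : List (List (String × String))) :
    ∀ st : Option String × Bool,
      samples.foldl (fun st s => pvUpd st s key) st = (pvVs key samples).foldl pvStep st := by
  induction samples with
  | nil => intro st; rfl
  | cons s rest ih =>
    intro st
    simp only [List.foldl_cons, pvVs, List.filterMap_cons]
    cases h : List.lookup key s with
    | none =>
      have hu : pvUpd st s key = st := by simp [pvUpd, h]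
      simp [hu, ih st, pvVs]
    | some v =>
      by_cases hv : v = ""
      · have hu : pvUpd st s key = st := by simp [pvUpd, pvStep, h, hv]
        simp [hu, hv, ih st, pvVs]
      · have hu : pvUpd st s key = pvStep st v := by simp [pvUpd, h]
        simp [hu, hv, ih (pvStep st v), pvVs]

theorem pvStep_add (S : List String) (v : String) (hv : v ≠ "") :
    pvStep (S.head?, decide (2 ≤ S.length)) v
      = ((PySem.Set.add S v).head?, decide (2 ≤ (PySem.Set.add S v).length)) := by
  cases S with
  | nil => simp [pvStep, PySem.Set.add, PySem.Set.contains, hv]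
  | cons c rest =>
    by_cases hc : v = c
    · subst hc
      simp [pvStep, PySem.Set.add, PySem.Set.contains, hv]
    · by_cases hmem : v ∈ rest
      · have h1 : 0 < rest.length := List.length_pos_of_mem hmem
        simp only [pvStep, PySem.Set.add, PySem.Set.contains]
        simp [hv, hc, hmem]
        omega
      · simp only [pvStep, PySem.Set.add, PySem.Set.contains]
        simp [hv, hc, hmem]

theorem pvInv (vs : List String) :
    ∀ S : List String, (∀ v ∈ vs, v ≠ "") →
      vs.foldl pvStep (S.head?, decide (2 ≤ S.length))
        = ((vs.foldl PySem.Set.add S).head?, decide (2 ≤ (vs.foldl PySem.Set.add S).length)) := by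
  induction vs with
  | nil => intro S _; rfl
  | cons v vs ih =>
    intro S h
    have hv : v ≠ "" := h v (by simp)
    simp only [List.foldl_cons, pvStep_add S v hv]
    exact ih (PySem.Set.add S v) (fun w hw => h w (by simp [hw]))

theorem pvVs_ne (key : String) (samples : List (List (String × String))) :
    ∀ v ∈ pvVs key samples, v ≠ "" := by
  intro v hv
  simp only [pvVs, List.mem_filterMap] at hv
  obtain ⟨s, _, hs⟩ := hv
  by_cases h : (List.lookup key s).getD "" = ""
  · simp [h] at hs
  · simp [h] at hs
    exact hs ▸ h

theorem pvField_eq (key : String) (samples : List (List (String × String))) :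
    (if (PySem.Set.ofList (pvVs key samples)).length = 1
      then (PySem.Set.ofList (pvVs key samples)).head? else none)
    = (if (samples.foldl (fun st s => pvUpd st s key) (none, false)).1.isSome
          ∧ (samples.foldl (fun st s => pvUpd st s key) (none, false)).2 = false
       then (samples.foldl (fun st s => pvUpd st s key) (none, false)).1 else none) := by
  have hscan := pvScan_eq key samples ((none : Option String), false)
  have h0 : ((none : Option String), false)
      = (([] : List String).head?, decide (2 ≤ ([] : List String).length)) := by simp
  rw [hscan, h0, pvInv (pvVs key samples) [] (pvVs_ne key samples)]
  rw [show (pvVs key samples).foldl PySem.Set.add [] = PySem.Set.ofList (pvVs key samples) from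
    (PySem.Set.ofList_eq_foldl _).symm]
  cases hL : PySem.Set.ofList (pvVs key samples) with
  | nil => simp
  | cons x xs =>
    cases xs with
    | nil => simp
    | cons y ys => simp

theorem pvA_char (samples : List (List (String × String))) (ip : Option String) (port : Option Int) :
    infer_target samples ip port
      = (if samples ≠ [] ∧ ip = none then
           (if (PySem.Set.ofList (pvVs "ip" samples)).length = 1
             then (PySem.Set.ofList (pvVs "ip" samples)).head? else none)
         else ip,
         if samples ≠ [] ∧ port = none then
           (if (PySem.Set.ofList (pvVs "port" samples)).length = 1
             then (PySem.Set.ofList (pvVs "port" samples)).head? else none)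
         else port.map (fun p => PySem.Int.toStr p)) := by
  cases samples with
  | nil => cases ip <;> cases port <;> simp [infer_target]
  | cons s rest => cases ip <;> cases port <;> simp [infer_target, pvVs]

theorem pvB_char (samples : List (List (String × String))) (ip : Option String) (port : Option Int) :
    infer_target_alt samples ip port
      = (if ip = none then
           (if (pvScanIp samples).1.isSome ∧ (pvScanIp samples).2 = false
             then (pvScanIp samples).1 else none)
         else ip,
         if port = none then
           (if (pvScanPort samples).1.isSome ∧ (pvScanPort samples).2 = false
             then (pvScanPort samples).1 else none)
         else port.map (fun p => PySem.Int.toStr p)) := by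
  unfold infer_target_alt
  rw [pvFoldl_pair]
  cases ip <;> cases port <;> simp [pvScanIp, pvScanPort]

-- ===== VERDICT (by name: the statement is the Claim_ definition above) =====
theorem infer_target_spec : Claim_equal_infer_target := by
  intro samples ip port _ _
  unfold Spec_infer_target
  rw [pvA_char, pvB_char]
  have hip := pvField_eq "ip" samples
  have hport := pvField_eq "port" samples
  cases samples with
  | nil =>
    cases ip <;> cases port <;> simp [pvScanIp, pvScanPort, pvUpd]
  | cons s rest =>
    cases ip <;> cases port <;> simp only [pvScanIp, pvScanPort] <;>
      simp [hip, hport]
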